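-- pv_equiv track=rewrite | github.com/isaacksdata/Advent-of-code-2023 | solutions/day_9.py | predict_value
-- ===== SOURCE A (Python) =====
-- from typing import List
--
-- def predict_value(gradients: List[List[int]], predict_next: bool = True) -> int:
--     """
--     Predict the next measurement by adding the below gradient to the previous number in each gradient
--     :param gradients: input list of gradients
--     :param predict_next: If True then predict next number in sequence, else predict previous
--     :return: gradients with next value predicted
--     """
--     for i, grad in enumerate(gradients):
--         if i == 0:
--             if predict_next:
--                 grad.append(0)
--             else:
--                 grad.insert(0, 0)
--         else:
--             if predict_next:
--                 grad.append(grad[-1] + gradients[i - 1][-1])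
--             else:
--                 grad.insert(0, grad[0] - gradients[i - 1][0])
--     idx = -1 if predict_next else 0
--     return gradients[-1][idx]
-- ===== SOURCE B (Python) =====
-- from typing import List
--
--
-- def predict_value(gradients: List[List[int]], predict_next: bool = True) -> int:
--     """Precompute edge values and a prefix accumulation, then mutate each row once.
--
--     Like the original, this mutates the rows of `gradients` in place
--     (append for predict_next, insert(0, ...) for predict_prev).
--     """
--     if predict_next:
--         edges = [g[-1] for g in gradients[1:]]
--     else:
--         edges = [g[0] for g in gradients[1:]]
--     values = [0]
--     if predict_next:
--         for e in edges:
--             values.append(e + values[-1])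
--     else:
--         for e in edges:
--             values.append(e - values[-1])
--     for g, v in zip(gradients, values):
--         if predict_next:
--             g.append(v)
--         else:
--             g.insert(0, v)
--     return values[-1]
-- ===== Notes on version B (the rewrite author's own statement) =====
-- stated objective: alternative
-- what changed: B replaces A's single in-place loop that reads the neighbouring mutated row with a three-pass precompute-then-apply scheme: it first collects the edge element of every row after the first, then builds the list of values to attach by a prefix accumulation (add for next, subtractive fold for prev), and only then mutates each row once, returning the last accumulated value.
import Mathlib
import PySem

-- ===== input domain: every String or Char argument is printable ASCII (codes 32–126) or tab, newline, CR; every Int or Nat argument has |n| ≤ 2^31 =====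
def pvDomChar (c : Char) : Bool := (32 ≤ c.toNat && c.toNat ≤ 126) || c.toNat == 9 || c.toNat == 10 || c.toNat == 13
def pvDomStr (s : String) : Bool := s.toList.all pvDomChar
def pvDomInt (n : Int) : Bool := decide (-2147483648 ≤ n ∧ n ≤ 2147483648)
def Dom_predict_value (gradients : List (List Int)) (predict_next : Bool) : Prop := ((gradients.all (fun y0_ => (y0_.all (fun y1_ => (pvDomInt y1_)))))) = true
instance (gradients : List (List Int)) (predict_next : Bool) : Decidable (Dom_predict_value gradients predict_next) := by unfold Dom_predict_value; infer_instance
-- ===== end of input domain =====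

-- B precomputes the edge elements and a prefix accumulation before mutating; same cost,
-- different decomposition. Both Pythons mutate the argument rows in place identically;
-- the equivalence proved here is about the RETURN value.

-- ===== PORT A =====
-- A's loop mutates the list of rows in place.  When row i is read, rows ≥ i are still the
-- original ones and rows < i are already extended, so the state `acc` is the list of rows
-- processed so far, `ig.2` is the original row i, and `gradients[i-1]` is `acc[i-1]`.
-- grad[-1]/grad[0]/gradients[-1][idx] are pyGetD (their IndexErrors are excluded by Pre_).
def pvAstep (predict_next : Bool) (acc : List (List Int)) (ig : Int × List Int) : List (List Int) :=
  let grad := ig.2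
  if ig.1 = 0 then
    acc ++ [if predict_next then grad ++ [(0 : Int)] else (0 : Int) :: grad]
  else
    let prev := PySem.List.pyGetD acc (ig.1 - 1) ([] : List Int)
    if predict_next then
      acc ++ [grad ++ [PySem.List.pyGetD grad (-1) 0 + PySem.List.pyGetD prev (-1) 0]]
    else
      acc ++ [(PySem.List.pyGetD grad 0 0 - PySem.List.pyGetD prev 0 0) :: grad]

def predict_value (gradients : List (List Int)) (predict_next : Bool) : Int :=
  let processed := (PySem.List.enumerate gradients).foldl (pvAstep predict_next) []
  let idx : Int := if predict_next then -1 else 0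
  PySem.List.pyGetD (PySem.List.pyGetD processed (-1) ([] : List Int)) idx 0

-- ===== PORT B =====
-- The final zip/mutation pass of Source B only updates the argument rows in place and does not
-- contribute to the return value (values[-1]); it has no return-value counterpart here.
def pvBstep (predict_next : Bool) (vs : List Int) (e : Int) : List Int :=
  vs ++ [if predict_next then e + PySem.List.pyGetD vs (-1) 0 else e - PySem.List.pyGetD vs (-1) 0]

def predict_value_alt (gradients : List (List Int)) (predict_next : Bool) : Int :=
  let edges := if predict_next then gradients.tail.map (fun g => PySem.List.pyGetD g (-1) 0)
               else gradients.tail.map (fun g => PySem.List.pyGetD g 0 0)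
  let values := edges.foldl (pvBstep predict_next) [(0 : Int)]
  PySem.List.pyGetD values (-1) 0

-- ===== PRECONDITION & SPEC =====
-- Pre_ excludes exactly the inputs where Python A raises IndexError: an empty gradients list
-- (gradients[-1]) and any empty row after the first (grad[-1]/grad[0]).
def Pre_predict_value (gradients : List (List Int)) (predict_next : Bool) : Prop :=
  gradients ≠ [] ∧ ∀ g ∈ gradients.tail, g ≠ []
instance (gradients : List (List Int)) (predict_next : Bool) : Decidable (Pre_predict_value gradients predict_next) := by unfold Pre_predict_value; infer_instance
def pvWitness_predict_value : List (List Int) × Bool := ([[1, 2, 3], [1, 1]], true)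

def Spec_predict_value (gradients : List (List Int)) (predict_next : Bool) (out : Int) : Prop := out = predict_value_alt gradients predict_next
instance (gradients : List (List Int)) (predict_next : Bool) (out : Int) : Decidable (Spec_predict_value gradients predict_next out) := by unfold Spec_predict_value; infer_instance

-- ===== CLAIM (what is proved, stated in full; the proofs are below) =====
def Claim_equal_predict_value : Prop := ∀ (gradients : List (List Int)) (predict_next : Bool), Dom_predict_value gradients predict_next → Pre_predict_value gradients predict_next → Spec_predict_value gradients predict_next (predict_value gradients predict_next)

-- ===== LEMMAS AND PROOFS =====

-- Loop invariant: the edge element of A's last processed row equals B's last accumulated value.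
lemma pv_loop (pn : Bool) (rest : List (List Int)) : ∀ (s : Int) (acc : List (List Int)) (vs : List Int),
    1 ≤ s → acc.length = s.toNat →
    PySem.List.pyGetD (PySem.List.pyGetD acc (-1) ([] : List Int)) (if pn then (-1 : Int) else 0) 0
      = PySem.List.pyGetD vs (-1) 0 →
    PySem.List.pyGetD (PySem.List.pyGetD ((PySem.List.enumerate rest s).foldl (pvAstep pn) acc) (-1) ([] : List Int)) (if pn then (-1 : Int) else 0) 0
      = PySem.List.pyGetD (rest.foldl (fun vs g => pvBstep pn vs (if pn then PySem.List.pyGetD g (-1) 0 else PySem.List.pyGetD g 0 0)) vs) (-1) 0 := by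
  induction rest with
  | nil => intro s acc vs _ _ hinv; simpa [PySem.List.enumerate] using hinv
  | cons g t ih =>
    intro s acc vs hs hlen hinv
    have hne : acc ≠ [] := by
      intro h; subst h; simp at hlen; omega
    have hprev : PySem.List.pyGetD acc (s - 1) ([] : List Int)
        = PySem.List.pyGetD acc (-1) ([] : List Int) := by
      rw [PySem.List.pyGetD_neg_one acc [] hne,
          PySem.List.pyGetD_eq_getElem acc [] (by omega) (by simp; omega),
          List.getLast_eq_getElem]
      congr 1
      omega
    rw [PySem.List.enumerate_cons, List.foldl_cons, List.foldl_cons]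
    have hstep : pvAstep pn acc (s, g)
        = acc ++ [if pn then g ++ [PySem.List.pyGetD g (-1) 0 + PySem.List.pyGetD (PySem.List.pyGetD acc (-1) ([] : List Int)) (-1) 0]
                  else (PySem.List.pyGetD g 0 0 - PySem.List.pyGetD (PySem.List.pyGetD acc (-1) ([] : List Int)) 0 0) :: g] := by
      cases pn <;> simp [pvAstep, hprev, show ¬ (s = 0) by omega]
    rw [hstep]
    apply ih (s + 1)
    · omega
    · simp [hlen]; omega
    · cases pn <;>
        simp_all [pvBstep, PySem.List.pyGetD_neg_one_append_singleton, PySem.List.pyGetD_zero_cons]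

-- ===== VERDICT (by name: the statement is the Claim_ definition above) =====
theorem predict_value_spec : Claim_equal_predict_value := by
  intro gradients pn _ hpre
  unfold Spec_predict_value
  obtain ⟨hne, -⟩ := hpre
  cases gradients with
  | nil => exact absurd rfl hne
  | cons g0 rest =>
    show predict_value (g0 :: rest) pn = predict_value_alt (g0 :: rest) pn
    unfold predict_value predict_value_alt
    simp only [List.tail_cons, PySem.List.enumerate_cons, List.foldl_cons]
    have hstep0 : pvAstep pn [] (0, g0)
        = [if pn then g0 ++ [(0 : Int)] else (0 : Int) :: g0] := by
      cases pn <;> simp [pvAstep]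
    rw [hstep0]
    cases pn with
    | true =>
      simp only [reduceIte, List.foldl_map]
      exact pv_loop true rest 1 [g0 ++ [0]] [0] (by omega) (by simp)
        (by have h0 : PySem.List.pyGetD [(0 : Int)] (-1) 0 = 0 := by decide
            rw [PySem.List.pyGetD_neg_one _ _ (by simp), h0]
            show PySem.List.pyGetD (g0 ++ [0]) (-1) 0 = 0
            exact PySem.List.pyGetD_neg_one_append_singleton g0 0 0)
    | false =>
      simp only [Bool.false_eq_true, if_false, List.foldl_map]
      exact pv_loop false rest 1 [0 :: g0] [0] (by omega) (by simp)
        (by have h0 : PySem.List.pyGetD [(0 : Int)] (-1) 0 = 0 := by decide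
            rw [PySem.List.pyGetD_neg_one _ _ (by simp), h0]
            show PySem.List.pyGetD (0 :: g0) 0 0 = 0
            exact PySem.List.pyGetD_zero_cons 0 g0 0)
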